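-- pv_equiv track=rewrite | github.com/MrBrantCode/unitest_baseline | mut_generate/mist_train_taco/taco_14354/solution.py | calculate_inconvenience
-- ===== SOURCE A (Python) =====
-- class UnionFind:
--     def __init__(self, n):
--         self.par = [x for x in range(n)]
--         self.rank = [1] * n
--         self.num = [1] * n
--
--     def root(self, a):
--         if self.par[a] == a:
--             return a
--         parent = self.root(self.par[a])
--         self.par[a] = parent
--         return parent
--
--     def unite(self, a, b):
--         (ra, rb) = (self.root(a), self.root(b))
--         out = self.num[ra] * self.num[rb]
--         if self.rank[ra] < self.rank[rb]:
--             (ra, rb) = (rb, ra)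
--         self.par[rb] = ra
--         self.num[ra] += self.num[rb]
--         if self.rank[ra] == self.rank[rb]:
--             self.rank[ra] += 1
--         return out
--
--     def same(self, a, b):
--         return self.root(a) == self.root(b)
--
--     def com_num(self, a, b):
--         if self.same(a, b):
--             return 0
--         else:
--             return self.unite(a, b)
--
-- def calculate_inconvenience(n, m, bridges):
--     incon = [0] * (m + 1)
--     uf = UnionFind(n)
--
--     # Initialize the inconvenience for the state after all bridges have collapsed
--     incon[m] = n * (n - 1) // 2
--
--     # Calculate inconvenience in reverse order (from last bridge to first)
--     for i in range(m - 1, -1, -1):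
--         (a, b) = bridges[i]
--         incon[i] = incon[i + 1] - uf.com_num(a - 1, b - 1)
--
--     # Return the inconvenience list excluding the last element (which is the initial state)
--     return incon[1:]
-- ===== SOURCE B (Python) =====
-- def calculate_inconvenience(n, m, bridges):
--     # Flat component-label connectivity instead of a union-find: merge by relabeling.
--     comp = list(range(n))
--     cur = n * (n - 1) // 2
--     out = []
--     for a, b in reversed(bridges[:m]):
--         out.append(cur)
--         la, lb = comp[a - 1], comp[b - 1]
--         if la != lb:
--             cur -= comp.count(la) * comp.count(lb)
--             comp = [la if c == lb else c for c in comp]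
--     out.reverse()
--     return out
-- ===== Notes on version B (the rewrite author's own statement) =====
-- stated objective: simpler
-- what changed: Replaces the recursive union-find (parent forest with path compression, union by rank, per-root size counters, and an inconvenience array filled by index) with a flat component-label list: a merge relabels every node of one component in place and the running pair-count is decremented by the product of the two label counts, collecting results in a list built backwards.
import Mathlib
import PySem

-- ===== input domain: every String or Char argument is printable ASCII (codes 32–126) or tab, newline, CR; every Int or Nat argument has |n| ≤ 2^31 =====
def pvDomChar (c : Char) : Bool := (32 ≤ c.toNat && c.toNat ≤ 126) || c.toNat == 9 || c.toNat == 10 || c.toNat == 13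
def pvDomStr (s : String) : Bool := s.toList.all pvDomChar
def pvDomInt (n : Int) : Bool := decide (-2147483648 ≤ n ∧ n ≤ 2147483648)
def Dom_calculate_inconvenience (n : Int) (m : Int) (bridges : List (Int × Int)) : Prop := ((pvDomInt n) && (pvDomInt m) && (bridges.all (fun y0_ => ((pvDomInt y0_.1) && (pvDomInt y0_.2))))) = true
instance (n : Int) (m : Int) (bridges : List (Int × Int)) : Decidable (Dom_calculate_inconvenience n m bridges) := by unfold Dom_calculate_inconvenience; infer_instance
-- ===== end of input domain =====

-- B replaces A's union-find (recursive path compression, union by rank, per-root sizes) by a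
-- flat component-label list with relabelling merges and a running pair counter: simpler, not faster.

-- ===== PORT A =====
-- UnionFind.root: Python's recursion on self.par with path compression; the fuel argument makes
-- the recursion total (callers pass fuel = len(par), enough for every rank-built parent forest);
-- the recursion, the test and the compressing write mirror A line by line.
def ufRoot : Nat → List Int → Int → Int × List Int
  | 0, par, a => (a, par)
  | fuel+1, par, a =>
    let p := PySem.List.pyGetD par a 0
    if p = a then (a, par)
    else
      let r := ufRoot fuel par p
      (r.1, PySem.List.pySetD r.2 a r.1)

-- UnionFind.unite
def ufUnite (par rank num : List Int) (a b : Int) : Int × (List Int × List Int × List Int) :=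
  let ra := ufRoot par.length par a
  let rb := ufRoot ra.2.length ra.2 b
  let out := PySem.List.pyGetD num ra.1 0 * PySem.List.pyGetD num rb.1 0
  let rab := if PySem.List.pyGetD rank ra.1 0 < PySem.List.pyGetD rank rb.1 0 then (rb.1, ra.1) else (ra.1, rb.1)
  let par3 := PySem.List.pySetD rb.2 rab.2 rab.1
  let num2 := PySem.List.pySetD num rab.1 (PySem.List.pyGetD num rab.1 0 + PySem.List.pyGetD num rab.2 0)
  let rank2 := if PySem.List.pyGetD rank rab.1 0 = PySem.List.pyGetD rank rab.2 0 then PySem.List.pySetD rank rab.1 (PySem.List.pyGetD rank rab.1 0 + 1) else rank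
  (out, (par3, rank2, num2))


-- UnionFind.com_num (same(a,b) computes both roots, compressing par; then unite if different)
def ufComNum (par rank num : List Int) (a b : Int) : Int × (List Int × List Int × List Int) :=
  let ra := ufRoot par.length par a
  let rb := ufRoot ra.2.length ra.2 b
  if ra.1 = rb.1 then (0, (rb.2, rank, num))
  else ufUnite rb.2 rank num a b


-- body of A's "for i in range(m - 1, -1, -1)" loop; state (incon, (par, rank, num))
def calcStepA (bridges : List (Int × Int))
    (st : List Int × (List Int × List Int × List Int)) (i : Int) :
    List Int × (List Int × List Int × List Int) :=
  let ab := PySem.List.pyGetD bridges i ((0:Int), (0:Int))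
  let g := ufComNum st.2.1 st.2.2.1 st.2.2.2 (ab.1 - 1) (ab.2 - 1)
  (PySem.List.pySetD st.1 i (PySem.List.pyGetD st.1 (i+1) 0 - g.1), g.2)


def calculate_inconvenience (n : Int) (m : Int) (bridges : List (Int × Int)) : List Int :=
  let incon0 := List.replicate (m+1).toNat (0:Int)
  let par0 := (List.range n.toNat).map (fun x : Nat => (x:Int))
  let rank0 := List.replicate n.toNat (1:Int)
  let num0 := List.replicate n.toNat (1:Int)
  let incon1 := PySem.List.pySetD incon0 m (PySem.Int.floordiv (n*(n-1)) 2)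
  let res := (PySem.List.pyRange (m-1) (-1) (-1)).foldl (calcStepA bridges) (incon1, (par0, rank0, num0))
  PySem.List.slice res.1 (some 1) none


-- ===== PORT B =====
-- body of B's "for a, b in reversed(bridges[:m])" loop; state (out, comp, cur)
def calcStepB (st : List Int × List Int × Int) (ab : Int × Int) : List Int × List Int × Int :=
  let out := st.1 ++ [st.2.2]
  let la := PySem.List.pyGetD st.2.1 (ab.1 - 1) 0
  let lb := PySem.List.pyGetD st.2.1 (ab.2 - 1) 0
  if la ≠ lb then
    (out, st.2.1.map (fun c => if c = lb then la else c),
      st.2.2 - (PySem.List.count st.2.1 la : Int) * (PySem.List.count st.2.1 lb : Int))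
  else (out, st.2.1, st.2.2)


def calculate_inconvenience_alt (n : Int) (m : Int) (bridges : List (Int × Int)) : List Int :=
  let comp0 := (List.range n.toNat).map (fun x : Nat => (x:Int))
  let cur0 := PySem.Int.floordiv (n*(n-1)) 2
  let res := ((PySem.List.slice bridges none (some m)).reverse).foldl calcStepB ([], comp0, cur0)
  res.1.reverse


-- ===== PRECONDITION & SPEC =====
-- Pre_ is exactly the set of inputs on which the Python A returns normally: 0 <= m <= len(bridges)
-- (otherwise incon[m] or bridges[i] raises IndexError), and every endpoint a of the first m
-- bridges has its 0-based index a-1 inside Python's accepted range [-n, n) for the length-n node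
-- lists (otherwise par[a-1] raises IndexError); negative (wrap-around) endpoints stay inside Pre_.
def Pre_calculate_inconvenience (n : Int) (m : Int) (bridges : List (Int × Int)) : Prop :=
  0 ≤ m ∧ m ≤ bridges.length ∧
    ∀ p ∈ bridges.take m.toNat, (1 - n ≤ p.1 ∧ p.1 ≤ n ∧ 1 - n ≤ p.2 ∧ p.2 ≤ n)
instance (n : Int) (m : Int) (bridges : List (Int × Int)) : Decidable (Pre_calculate_inconvenience n m bridges) := by unfold Pre_calculate_inconvenience; infer_instance

def pvWitness_calculate_inconvenience : Int × Int × (List (Int × Int)) := (4, 2, [(1,2),(2,3)])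

def Spec_calculate_inconvenience (n : Int) (m : Int) (bridges : List (Int × Int)) (out : List Int) : Prop := out = calculate_inconvenience_alt n m bridges
instance (n : Int) (m : Int) (bridges : List (Int × Int)) (out : List Int) : Decidable (Spec_calculate_inconvenience n m bridges out) := by unfold Spec_calculate_inconvenience; infer_instance

-- ===== CLAIM (what is proved, stated in full; the proofs are below) =====
def Claim_equal_calculate_inconvenience : Prop := ∀ (n : Int) (m : Int) (bridges : List (Int × Int)), Dom_calculate_inconvenience n m bridges → Pre_calculate_inconvenience n m bridges → Spec_calculate_inconvenience n m bridges (calculate_inconvenience n m bridges)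

-- ===== LEMMAS AND PROOFS =====

-- shorthand for in-range list access (all proof-side indices are Nats)
def pget (xs : List Int) (j : Nat) : Int := xs.getD j 0

-- Python's normalisation of a (possibly negative) in-range index into a list of length n'
def normIdx (n' : Nat) (i : Int) : Nat := if 0 ≤ i then i.toNat else n' - (-i).toNat

-- iterated parent map
def parIter (par : List Int) : Nat → Nat → Nat
  | 0, j => j
  | l+1, j => parIter par l (pget par j).toNat

-- what UnionFind.root leaves behind: entries unchanged or redirected to the root r
def RootRes (n' : Nat) (rank comp par par' : List Int) (r : Nat) : Prop :=
  par'.length = par.length ∧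
  ∀ t, t < n' → pget par' t = pget par t ∨
    ((pget par t).toNat ≠ t ∧ pget par' t = (r:Int) ∧ pget rank t < pget rank r ∧
      pget comp t = pget comp r)


theorem normIdx_lt (n' : Nat) (i : Int) (hlo : -(n':Int) ≤ i) (hhi : i < (n':Int)) :
    normIdx n' i < n' := by
  unfold normIdx; split_ifs with h <;> omega

theorem normIdx_natCast (n' : Nat) (j : Nat) : normIdx n' (j : Int) = j := by
  unfold normIdx; simp

theorem pyIdx?_norm (n' : Nat) (i : Int) (hlo : -(n':Int) ≤ i) (hhi : i < (n':Int)) :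
    PySem.List.pyIdx? n' i = some (normIdx n' i) := by
  unfold PySem.List.pyIdx? normIdx; split_ifs <;> simp_all

theorem pyGetD_norm (xs : List Int) (n' : Nat) (h : xs.length = n') (i : Int) (d : Int)
    (hlo : -(n':Int) ≤ i) (hhi : i < (n':Int)) :
    PySem.List.pyGetD xs i d = pget xs (normIdx n' i) := by
  unfold PySem.List.pyGetD PySem.List.pyGet? pget
  rw [h, pyIdx?_norm n' i hlo hhi]
  have := normIdx_lt n' i hlo hhi
  simp [List.getD, List.getElem?_eq_getElem (by omega : normIdx n' i < xs.length)]

theorem pySetD_norm (xs : List Int) (n' : Nat) (h : xs.length = n') (i : Int) (v : Int)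
    (hlo : -(n':Int) ≤ i) (hhi : i < (n':Int)) :
    PySem.List.pySetD xs i v = xs.set (normIdx n' i) v := by
  unfold PySem.List.pySetD PySem.List.pySet?
  rw [h, pyIdx?_norm n' i hlo hhi]; rfl

theorem pget_lt_length (xs : List Int) (j : Nat) (h : j < xs.length) : pget xs j = xs[j] := by
  unfold pget; rw [List.getD_eq_getElem?_getD, List.getElem?_eq_getElem h]; rfl

theorem pget_set_self (xs : List Int) (j : Nat) (v : Int) (h : j < xs.length) :
    pget (xs.set j v) j = v := by
  rw [pget_lt_length _ _ (by simpa using h)]; simp [List.getElem_set_self]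

theorem pget_set_ne (xs : List Int) (j t : Nat) (v : Int) (hne : t ≠ j) :
    pget (xs.set j v) t = pget xs t := by
  unfold pget
  rcases Nat.lt_or_ge t xs.length with h | h
  · rw [List.getD_eq_getElem?_getD, List.getD_eq_getElem?_getD,
      List.getElem?_set_ne (by omega), ]
  · rw [List.getD_eq_getElem?_getD, List.getD_eq_getElem?_getD,
      List.getElem?_eq_none (by simpa using h), List.getElem?_eq_none (by simpa using h)]

theorem parIter_root_fix (par : List Int) (j : Nat) (h : (pget par j).toNat = j) :
    ∀ l, parIter par l j = j := by
  intro l; induction l with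
  | zero => rfl
  | succ l ih => simp only [parIter, h]; exact ih

theorem rootRes_refl (n' : Nat) (rank comp par : List Int) (r : Nat) :
    RootRes n' rank comp par par r := ⟨rfl, fun _ _ => Or.inl rfl⟩

theorem ufRoot_go (n' : Nat) (par rank comp : List Int)
    (hlen : par.length = n')
    (hP : ∀ j, j < n' → 0 ≤ pget par j ∧ (pget par j).toNat < n')
    (hR : ∀ j, j < n' → (pget par j).toNat ≠ j → pget rank j < pget rank (pget par j).toNat)
    (hC : ∀ j, j < n' → pget comp ((pget par j).toNat) = pget comp j) :
    ∀ (l : Nat) (j : Nat) (fuel : Nat), j < n' →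
      (pget par (parIter par l j)).toNat = parIter par l j →
      l ≤ fuel →
      ∃ par', ufRoot fuel par (j:Int) = ((parIter par l j : Int), par') ∧
        RootRes n' rank comp par par' (parIter par l j) ∧
        parIter par l j < n' ∧
        (pget par (parIter par l j)).toNat = parIter par l j ∧
        pget comp (parIter par l j) = pget comp j ∧
        pget rank j ≤ pget rank (parIter par l j) := by
  intro l
  induction l with
  | zero =>
    intro j fuel hj hroot _
    have h0 : parIter par 0 j = j := rfl
    rw [h0] at hroot ⊢
    have hpj : pget par j = (j:Int) := by have h0 := (hP j hj).1; omega
    refine ⟨par, ?_, rootRes_refl n' rank comp par j, hj, hroot, rfl, le_refl _⟩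
    match fuel with
    | 0 => rfl
    | fuel+1 =>
      simp only [ufRoot]
      rw [pyGetD_norm par n' hlen _ 0 (by omega) (by exact_mod_cast hj),
        normIdx_natCast, hpj, if_pos rfl]
  | succ l ih =>
    intro j fuel hj hroot hfuel
    by_cases hrj : (pget par j).toNat = j
    · have hfix : parIter par (l+1) j = parIter par l j := by
        simp only [parIter, hrj]
      rw [hfix] at hroot ⊢
      exact ih j fuel hj hroot (by omega)
    · obtain ⟨f, rfl⟩ : ∃ f, fuel = f + 1 := ⟨fuel - 1, by omega⟩
      have hp0 := (hP j hj).1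
      have hpn := (hP j hj).2
      set pn : Nat := (pget par j).toNat with hpndef
      have hpcast : pget par j = (pn : Int) := by omega
      have hstep : parIter par (l+1) j = parIter par l pn := rfl
      rw [hstep] at hroot ⊢
      obtain ⟨par', heq, hres, hlt, hrt, hcomp, hrank⟩ :=
        ih pn f hpn hroot (by omega)
      refine ⟨par'.set j ((parIter par l pn : Nat) : Int), ?_, ?_, hlt, hrt, ?_, ?_⟩
      · simp only [ufRoot]
        rw [pyGetD_norm par n' hlen _ 0 (by omega) (by exact_mod_cast hj), normIdx_natCast]
        have hne : ¬ (pget par j = (j:Int)) := by omega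
        rw [if_neg hne, hpcast, heq]
        simp only []
        rw [pySetD_norm par' n' (by rw [hres.1, hlen]) _ _ (by omega)
          (by exact_mod_cast hj), normIdx_natCast]
      · refine ⟨by simp [hres.1], fun t ht => ?_⟩
        rcases eq_or_ne t j with rfl | hne
        · right
          refine ⟨hrj, pget_set_self _ _ _ (by rw [hres.1, hlen]; omega), ?_, ?_⟩
          · exact lt_of_lt_of_le (hR t ht hrj) hrank
          · rw [← hcomp.symm, hC t ht]
        · rw [pget_set_ne _ _ _ _ hne]
          exact hres.2 t ht
      · rw [hcomp, hC j hj]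
      · exact le_trans (le_of_lt (hR j hj hrj)) hrank

def UFInv (n' : Nat) (par rank num comp : List Int) : Prop :=
  par.length = n' ∧ rank.length = n' ∧ num.length = n' ∧ comp.length = n' ∧
  (∀ j, j < n' → 0 ≤ pget par j ∧ (pget par j).toNat < n') ∧
  (∀ j, j < n' → (pget par j).toNat ≠ j → pget rank j < pget rank (pget par j).toNat) ∧
  (∀ j, j < n' → 1 ≤ pget rank j ∧ pget rank j ≤ (n' : Int)) ∧
  (∀ j, j < n' → pget comp ((pget par j).toNat) = pget comp j) ∧
  (∀ j, j < n' → ∀ k, k < n' → (pget par j).toNat = j → (pget par k).toNat = k →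
      pget comp j = pget comp k → j = k) ∧
  (∀ j, j < n' → (pget par j).toNat = j → pget num j = (List.count (pget comp j) comp : Int)) ∧
  (∀ j, j < n' → (pget par j).toNat = j → 2 ^ ((pget rank j).toNat - 1) ≤ List.count (pget comp j) comp)

-- every node reaches a root along a short path (ranks increase strictly and are ≤ n')
theorem exists_root (n' : Nat) (par rank num comp : List Int)
    (hInv : UFInv n' par rank num comp) :
    ∀ j, j < n' → ∃ l, (pget par (parIter par l j)).toNat = parIter par l j ∧
      l + (pget rank j).toNat ≤ n' := by
  obtain ⟨hlen, hrk, hnm, hcm, hP, hR, hRb, hC, hU, hN, hS⟩ := hInv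
  intro j hj
  have main : ∀ (fuel j : Nat), j < n' → n' + 1 ≤ fuel + (pget rank j).toNat →
      ∃ l, (pget par (parIter par l j)).toNat = parIter par l j ∧
        l + (pget rank j).toNat ≤ n' := by
    intro fuel
    induction fuel with
    | zero =>
      intro j hj hf
      exfalso
      have := (hRb j hj).2
      omega
    | succ fuel ih =>
      intro j hj hf
      by_cases hrj : (pget par j).toNat = j
      · exact ⟨0, by simpa [parIter] using hrj, by have := (hRb j hj).2; omega⟩
      · have hpn := (hP j hj).2
        have hlt := hR j hj hrj
        have h1 := (hRb j hj).1
        have h2 := (hRb ((pget par j).toNat) hpn).2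
        obtain ⟨l, hl1, hl2⟩ := ih ((pget par j).toNat) hpn (by omega)
        exact ⟨l + 1, by simpa [parIter] using hl1, by omega⟩
  exact main n' j hj (by have := (hRb j hj).1; omega)

-- RootRes preserves the invariant (rank, num, comp untouched) and the root set
theorem UFInv_of_RootRes (n' : Nat) (par par' rank num comp : List Int) (r : Nat)
    (hInv : UFInv n' par rank num comp)
    (hres : RootRes n' rank comp par par' r)
    (hr : r < n') (hroot : (pget par r).toNat = r) :
    UFInv n' par' rank num comp ∧
      (∀ t, t < n' → ((pget par' t).toNat = t ↔ (pget par t).toNat = t)) := by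
  obtain ⟨hlen, hrk, hnm, hcm, hP, hR, hRb, hC, hU, hN, hS⟩ := hInv
  obtain ⟨hlen', hent⟩ := hres
  have hr0 : 0 ≤ pget par r := (hP r hr).1
  have hroots : ∀ t, t < n' → ((pget par' t).toNat = t ↔ (pget par t).toNat = t) := by
    intro t ht
    rcases hent t ht with h | ⟨h1, h2, h3, h4⟩
    · rw [h]
    · rw [h2]
      constructor
      · intro h5
        exfalso
        have : r = t := by omega
        subst this; exact absurd h3 (lt_irrefl _)
      · intro h5; exact absurd h5 h1
  refine ⟨⟨by omega, hrk, hnm, hcm, ?_, ?_, hRb, ?_, ?_, ?_, ?_⟩, hroots⟩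
  · intro j hj
    rcases hent j hj with h | ⟨_, h2, _, _⟩
    · rw [h]; exact hP j hj
    · rw [h2]; constructor <;> omega
  · intro j hj hne
    rcases hent j hj with h | ⟨h1, h2, h3, _⟩
    · rw [h] at hne ⊢; exact hR j hj hne
    · rw [h2]
      have : ((r:Int)).toNat = r := by omega
      rw [this]; exact h3
  · intro j hj
    rcases hent j hj with h | ⟨_, h2, _, h4⟩
    · rw [h]; exact hC j hj
    · rw [h2]
      have : ((r:Int)).toNat = r := by omega
      rw [this, h4]
  · intro j hj k hk hj' hk'
    exact hU j hj k hk ((hroots j hj).1 hj') ((hroots k hk).1 hk')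
  · intro j hj hj'
    exact hN j hj ((hroots j hj).1 hj')
  · intro j hj hj'
    exact hS j hj ((hroots j hj).1 hj')

-- full specification of a root call with fuel n' on any in-range Python index i
theorem ufRoot_spec (n' : Nat) (par rank num comp : List Int)
    (hInv : UFInv n' par rank num comp)
    (i : Int) (hlo : -(n':Int) ≤ i) (hhi : i < (n':Int)) (fuel : Nat) (hfuel : n' ≤ fuel) :
    ∃ (rt : Nat) (par' : List Int),
      ufRoot fuel par i = ((rt : Int), par') ∧
      UFInv n' par' rank num comp ∧
      par'.length = n' ∧
      rt < n' ∧ (pget par' rt).toNat = rt ∧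
      pget comp rt = pget comp (normIdx n' i) ∧
      (∀ t, t < n' → ((pget par' t).toNat = t ↔ (pget par t).toNat = t)) := by
  obtain ⟨hlen, hrk, hnm, hcm, hP, hR, hRb, hC, hU, hN, hS⟩ := hInv
  have hInv' : UFInv n' par rank num comp := ⟨hlen, hrk, hnm, hcm, hP, hR, hRb, hC, hU, hN, hS⟩
  set j := normIdx n' i with hj'
  have hj : j < n' := normIdx_lt n' i hlo hhi
  obtain ⟨l, hlroot, hlbound⟩ := exists_root n' par rank num comp hInv' j hj
  have hrb1 := (hRb j hj).1
  by_cases hneg : 0 ≤ i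
  · -- i = (j : Int)
    have hij : i = (j:Int) := by
      rw [hj']; unfold normIdx; rw [if_pos hneg]; omega
    obtain ⟨par', heq, hres, hlt, hrt, hcomp, _⟩ :=
      ufRoot_go n' par rank comp hlen hP hR hC l j fuel hj hlroot (by omega)
    have hroot' : (pget par' (parIter par l j)).toNat = parIter par l j := by
      obtain ⟨_, hroots⟩ := UFInv_of_RootRes n' par par' rank num comp _ hInv' hres hlt hrt
      exact (hroots _ hlt).2 hrt
    obtain ⟨hInv2, hroots⟩ := UFInv_of_RootRes n' par par' rank num comp _ hInv' hres hlt hrt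
    exact ⟨parIter par l j, par', by rw [hij]; exact heq, hInv2,
      by rw [hres.1, hlen], hlt, hroot', hcomp, hroots⟩
  · -- negative index: one manual unfold, then the nonneg lemma on par[j]
    replace hneg : i < 0 := by omega
    obtain ⟨f, rfl⟩ : ∃ f, fuel = f + 1 := ⟨fuel - 1, by omega⟩
    have hp0 := (hP j hj).1
    have hpn := (hP j hj).2
    by_cases hrj : (pget par j).toNat = j
    · -- j itself is a root
      have hpj : pget par j = (j:Int) := by omega
      have hfix := parIter_root_fix par j hrj
      obtain ⟨par', heq, hres, hlt, hrt, hcomp, _⟩ :=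
        ufRoot_go n' par rank comp hlen hP hR hC 0 j f hj (by simpa [parIter] using hrj)
          (by omega)
      have h00 : parIter par 0 j = j := rfl
      rw [h00] at heq hres hlt hrt hcomp
      refine ⟨j, par'.set j ((j:Nat):Int), ?_, ?_, ?_, hj, ?_, by rfl, ?_⟩
      · simp only [ufRoot]
        rw [pyGetD_norm par n' hlen i 0 hlo hhi, ← hj', hpj]
        rw [if_neg (by omega), heq]
        simp only []
        rw [pySetD_norm par' n' (by rw [hres.1, hlen]) i _ hlo hhi, ← hj']
      · -- invariant for par'.set j j
        have hres2 : RootRes n' rank comp par (par'.set j ((j:Nat):Int)) j := by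
          refine ⟨by simp [hres.1], fun t ht => ?_⟩
          rcases eq_or_ne t j with rfl | hne
          · left
            rw [pget_set_self _ _ _ (by rw [hres.1, hlen]; omega), hpj]
          · rw [pget_set_ne _ _ _ _ hne]
            exact hres.2 t ht
        exact (UFInv_of_RootRes n' par _ rank num comp j hInv' hres2 hj hrj).1
      · simp [hres.1, hlen]
      · rw [pget_set_self _ _ _ (by rw [hres.1, hlen]; omega)]; omega
      · intro t ht
        have hres2 : RootRes n' rank comp par (par'.set j ((j:Nat):Int)) j := by
          refine ⟨by simp [hres.1], fun t ht => ?_⟩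
          rcases eq_or_ne t j with rfl | hne
          · left
            rw [pget_set_self _ _ _ (by rw [hres.1, hlen]; omega), hpj]
          · rw [pget_set_ne _ _ _ _ hne]
            exact hres.2 t ht
        exact (UFInv_of_RootRes n' par _ rank num comp j hInv' hres2 hj hrj).2 t ht
    · -- j is not a root: recursion enters at par[j]
      set pn : Nat := (pget par j).toNat with hpndef
      have hpcast : pget par j = (pn : Int) := by omega
      obtain ⟨l', rfl⟩ : ∃ l', l = l' + 1 := by
        refine ⟨l - 1, ?_⟩
        rcases Nat.eq_zero_or_pos l with rfl | hpos
        · exfalso; exact hrj (by simpa [parIter] using hlroot)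
        · omega
      have hstep : parIter par (l'+1) j = parIter par l' pn := rfl
      rw [hstep] at hlroot
      obtain ⟨par', heq, hres, hlt, hrt, hcomp, hrank⟩ :=
        ufRoot_go n' par rank comp hlen hP hR hC l' pn f hpn hlroot (by omega)
      set rt := parIter par l' pn
      have hres2 : RootRes n' rank comp par (par'.set j ((rt:Nat):Int)) rt := by
        refine ⟨by simp [hres.1], fun t ht => ?_⟩
        rcases eq_or_ne t j with rfl | hne
        · right
          refine ⟨hrj, pget_set_self _ _ _ (by rw [hres.1, hlen]; omega), ?_, ?_⟩
          · exact lt_of_lt_of_le (hR j ht hrj) hrank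
          · rw [← hcomp.symm, hC j ht]
        · rw [pget_set_ne _ _ _ _ hne]
          exact hres.2 t ht
      obtain ⟨hInv2, hroots⟩ :=
        UFInv_of_RootRes n' par _ rank num comp rt hInv' hres2 hlt hrt
      refine ⟨rt, par'.set j ((rt:Nat):Int), ?_, hInv2, by simp [hres.1, hlen], hlt,
        (hroots rt hlt).2 hrt, by rw [hcomp, hC j hj], hroots⟩
      simp only [ufRoot]
      rw [pyGetD_norm par n' hlen i 0 hlo hhi, ← hj']
      rw [if_neg (by omega), hpcast, heq]
      simp only []
      rw [pySetD_norm par' n' (by rw [hres.1, hlen]) i _ hlo hhi, ← hj']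

theorem count_relabel_cw (comp : List Int) (cw cl : Int) (h : cw ≠ cl) :
    List.count cw (comp.map (fun c => if c = cl then cw else c)) =
      List.count cw comp + List.count cl comp := by
  induction comp with
  | nil => rfl
  | cons x xs ih =>
    simp only [List.map_cons, List.count_cons, ih]
    split_ifs with h1 h2 h3 h4 h5 <;> simp_all <;> omega

theorem count_relabel_other (comp : List Int) (cw cl x : Int) (h1 : x ≠ cw) (h2 : x ≠ cl) :
    List.count x (comp.map (fun c => if c = cl then cw else c)) = List.count x comp := by
  induction comp with
  | nil => rfl
  | cons y ys ih =>
    simp only [List.map_cons, List.count_cons, ih]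
    split_ifs with h3 h4 h5 <;> simp_all

theorem pget_map_ite (comp : List Int) (cw cl : Int) (t : Nat) (ht : t < comp.length) :
    pget (comp.map (fun c => if c = cl then cw else c)) t =
      if pget comp t = cl then cw else pget comp t := by
  unfold pget
  rw [List.getD_eq_getElem?_getD, List.getD_eq_getElem?_getD,
    List.getElem?_eq_getElem (by simpa using ht), List.getElem?_eq_getElem ht]
  simp

-- after a merge: winner w, loser lo (both roots, distinct classes {c1, c2});
-- B always relabels c2 (the class of b's endpoint) to c1, whichever root wins by rank.
theorem two_pow_pred (k : Nat) (h : 1 ≤ k) : 2 ^ (k-1) + 2 ^ (k-1) = 2 ^ k := by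
  obtain ⟨k', rfl⟩ := Nat.exists_eq_add_of_le h
  have h1 : 1 + k' - 1 = k' := by omega
  rw [h1, Nat.add_comm 1 k', pow_succ]
  omega

theorem unite_reestablish (n' : Nat) (par rank num comp : List Int)
    (hInv : UFInv n' par rank num comp)
    (c1 c2 : Int) (hc : c1 ≠ c2)
    (w lo : Nat) (hw : w < n') (hlo : lo < n')
    (hrootw : (pget par w).toNat = w) (hrootlo : (pget par lo).toNat = lo)
    (hcls : (pget comp w = c1 ∧ pget comp lo = c2) ∨ (pget comp w = c2 ∧ pget comp lo = c1))
    (hrk : pget rank lo ≤ pget rank w) :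
    UFInv n' (par.set lo ((w:Nat):Int))
      (if pget rank w = pget rank lo then rank.set w (pget rank w + 1) else rank)
      (num.set w (pget num w + pget num lo))
      (comp.map (fun c => if c = c2 then c1 else c)) := by
  obtain ⟨hlen, hrkl, hnm, hcm, hP, hR, hRb, hC, hU, hN, hS⟩ := hInv
  have hwlo : w ≠ lo := by
    intro h; subst h; rcases hcls with ⟨h1, h2⟩ | ⟨h1, h2⟩ <;> exact hc (h1 ▸ h2 ▸ rfl)
  set comp' := comp.map (fun c => if c = c2 then c1 else c) with hcomp'
  set rank' := (if pget rank w = pget rank lo then rank.set w (pget rank w + 1) else rank)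
    with hrank'
  -- basic pget facts
  have hplen : (par.set lo ((w:Nat):Int)).length = n' := by simp [hlen]
  have hpar_lo : pget (par.set lo ((w:Nat):Int)) lo = (w:Int) :=
    pget_set_self _ _ _ (by omega)
  have hpar_other : ∀ t, t ≠ lo → pget (par.set lo ((w:Nat):Int)) t = pget par t :=
    fun t h => pget_set_ne _ _ _ _ h
  have hrank'_w : pget rank' w = if pget rank w = pget rank lo then pget rank w + 1
      else pget rank w := by
    rw [hrank']; split_ifs with h
    · exact pget_set_self _ _ _ (by omega)
    · rfl
  have hrank'_other : ∀ t, t ≠ w → pget rank' t = pget rank t := by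
    intro t h; rw [hrank']; split_ifs with hcase
    · exact pget_set_ne _ _ _ _ h
    · rfl
  have hnum_w : pget (num.set w (pget num w + pget num lo)) w = pget num w + pget num lo :=
    pget_set_self _ _ _ (by omega)
  have hnum_other : ∀ t, t ≠ w → pget (num.set w (pget num w + pget num lo)) t = pget num t :=
    fun t h => pget_set_ne _ _ _ _ h
  have hcomp'_t : ∀ t, t < n' → pget comp' t = if pget comp t = c2 then c1 else pget comp t :=
    fun t ht => pget_map_ite comp c1 c2 t (by omega)
  -- unique ownership of classes c1 c2 by the two roots
  have hgw : pget comp w = c1 ∨ pget comp w = c2 := by tauto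
  have hglo : pget comp lo = c1 ∨ pget comp lo = c2 := by tauto
  have hclsne : pget comp w ≠ pget comp lo := by
    rcases hcls with ⟨h1, h2⟩ | ⟨h1, h2⟩ <;> rw [h1, h2] <;> [exact hc; exact hc.symm]
  have hother_class : ∀ t, t < n' → (pget par t).toNat = t → t ≠ w → t ≠ lo →
      pget comp t ≠ c1 ∧ pget comp t ≠ c2 := by
    intro t ht htr htw htlo
    constructor <;> intro hx
    · rcases hcls with ⟨h1, _⟩ | ⟨_, h1⟩
      · exact htw (hU t ht w hw htr hrootw (hx.trans h1.symm))
      · exact htlo (hU t ht lo hlo htr hrootlo (hx.trans h1.symm))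
    · rcases hcls with ⟨_, h1⟩ | ⟨h1, _⟩
      · exact htlo (hU t ht lo hlo htr hrootlo (hx.trans h1.symm))
      · exact htw (hU t ht w hw htr hrootw (hx.trans h1.symm))
  -- class translation on comp'
  have hcomp'_w : pget comp' w = c1 := by
    rcases hgw with h | h <;> rw [hcomp'_t w hw, h] <;> simp
  have hcomp'_lo : pget comp' lo = c1 := by
    rcases hglo with h | h <;> rw [hcomp'_t lo hlo, h] <;> simp
  have hcomp'_keep : ∀ t, t < n' → pget comp t ≠ c2 → pget comp' t = pget comp t := by
    intro t ht h; rw [hcomp'_t t ht, if_neg h]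
  -- counts
  have hcount_c1 : List.count c1 comp' = List.count c1 comp + List.count c2 comp :=
    count_relabel_cw comp c1 c2 hc
  have hcount_other : ∀ x, x ≠ c1 → x ≠ c2 → List.count x comp' = List.count x comp :=
    fun x h1 h2 => count_relabel_other comp c1 c2 x h1 h2
  have hsum_le : List.count c1 comp + List.count c2 comp ≤ n' := by
    have := List.count_le_length (l := comp') (a := c1)
    rw [hcount_c1] at this
    simpa [hcomp', hcm] using this
  -- num at the two roots
  have hnum_sum : pget num w + pget num lo =
      ((List.count c1 comp + List.count c2 comp : Nat) : Int) := by
    have h1 := hN w hw hrootw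
    have h2 := hN lo hlo hrootlo
    rcases hcls with ⟨hw1, hlo1⟩ | ⟨hw1, hlo1⟩ <;> rw [hw1] at h1 <;> rw [hlo1] at h2 <;>
      rw [h1, h2] <;> push_cast <;> ring
  -- roots of the new forest: old roots except lo
  have hroots' : ∀ t, t < n' → ((pget (par.set lo ((w:Nat):Int)) t).toNat = t ↔
      ((pget par t).toNat = t ∧ t ≠ lo)) := by
    intro t ht
    rcases eq_or_ne t lo with rfl | hne
    · rw [hpar_lo]
      constructor
      · intro h; exfalso; apply hwlo; omega
      · intro h; exact absurd rfl h.2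
    · rw [hpar_other t hne]; tauto
  -- rank bound in the increment case
  have hrkb_w := hRb w hw
  have hrkb_lo := hRb lo hlo
  have hrank'_bound : 1 ≤ pget rank' w ∧ pget rank' w ≤ (n' : Int) := by
    rw [hrank'_w]
    split_ifs with hcase
    · constructor
      · omega
      · -- 2^(k-1) ≤ each count, so 2^k ≤ n', and k < 2^k
        have hs1 := hS w hw hrootw
        have hs2 := hS lo hlo hrootlo
        set k := (pget rank w).toNat with hk
        have hk1 : 1 ≤ k := by omega
        have hklo : (pget rank lo).toNat = k := by omega
        rw [hklo] at hs2
        have hcw : 2 ^ (k-1) ≤ List.count (pget comp w) comp := hs1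
        have hclo : 2 ^ (k-1) ≤ List.count (pget comp lo) comp := hs2
        have h2k : 2 ^ k ≤ List.count c1 comp + List.count c2 comp := by
          have hsplit := two_pow_pred k hk1
          rcases hcls with ⟨hw1, hlo1⟩ | ⟨hw1, hlo1⟩ <;>
            rw [hw1] at hcw <;> rw [hlo1] at hclo <;> omega
        have hklt : k < 2 ^ k := Nat.lt_two_pow_self
        omega
    · omega
  refine ⟨hplen, ?_, by simp [hnm], by simp [hcomp', hcm], ?_, ?_, ?_, ?_, ?_, ?_, ?_⟩
  · rw [hrank']; split_ifs <;> simp [hrkl]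
  · -- P
    intro j hj
    rcases eq_or_ne j lo with hje | hne
    · subst hje
      rw [hpar_lo]; constructor <;> omega
    · rw [hpar_other j hne]; exact hP j hj
  · -- R
    intro j hj hcond
    rcases eq_or_ne j lo with hje | hne
    · subst hje
      rw [hpar_lo] at hcond ⊢
      have : ((w:Int)).toNat = w := by omega
      rw [this]
      rw [hrank'_other j (Ne.symm hwlo), hrank'_w]
      split_ifs with hcase <;> omega
    · rw [hpar_other j hne] at hcond ⊢
      have hold := hR j hj hcond
      have hjw : j ≠ w := by
        intro h; subst h; exact hcond hrootw
      rw [hrank'_other j hjw]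
      rcases eq_or_ne ((pget par j).toNat) w with hpw | hpw
      · rw [hpw, hrank'_w]; split_ifs with hcase <;> rw [hpw] at hold <;> omega
      · rw [hrank'_other _ hpw]; exact hold
  · -- Rb
    intro j hj
    rcases eq_or_ne j w with hne0 | hne
    · rw [hne0]; exact hrank'_bound
    · rw [hrank'_other j hne]; exact hRb j hj
  · -- C
    intro j hj
    rcases eq_or_ne j lo with hje | hne
    · subst hje
      rw [hpar_lo]
      have : ((w:Int)).toNat = w := by omega
      rw [this, hcomp'_w, hcomp'_lo]
    · rw [hpar_other j hne]
      have hold := hC j hj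
      have hpj := (hP j hj).2
      rw [hcomp'_t j hj, hcomp'_t _ hpj, hold]
  · -- U
    intro j hj k hk hjr hkr hck
    rw [hroots' j hj] at hjr
    rw [hroots' k hk] at hkr
    obtain ⟨hjr, hjlo⟩ := hjr
    obtain ⟨hkr, hklo⟩ := hkr
    rcases eq_or_ne j w with hjw0 | hjw
    · rcases eq_or_ne k w with hkw0 | hkw
      · rw [hjw0, hkw0]
      · exfalso
        have hko := hother_class k hk hkr hkw hklo
        rw [hjw0, hcomp'_w, hcomp'_keep k hk hko.2] at hck
        exact hko.1 hck.symm
    · rcases eq_or_ne k w with hkw0 | hkw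
      · exfalso
        have hjo := hother_class j hj hjr hjw hjlo
        rw [hkw0, hcomp'_keep j hj hjo.2, hcomp'_w] at hck
        exact hjo.1 hck
      · have hjo := hother_class j hj hjr hjw hjlo
        have hko := hother_class k hk hkr hkw hklo
        rw [hcomp'_keep j hj hjo.2, hcomp'_keep k hk hko.2] at hck
        exact hU j hj k hk hjr hkr hck
  · -- N
    intro j hj hjr
    rw [hroots' j hj] at hjr
    obtain ⟨hjr, hjlo⟩ := hjr
    rcases eq_or_ne j w with hjw0 | hjw
    · rw [hjw0, hnum_w, hcomp'_w, hcount_c1, hnum_sum]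
    · have hjo := hother_class j hj hjr hjw hjlo
      rw [hnum_other j hjw, hcomp'_keep j hj hjo.2,
        hcount_other _ hjo.1 hjo.2]
      exact hN j hj hjr
  · -- S
    intro j hj hjr
    rw [hroots' j hj] at hjr
    obtain ⟨hjr, hjlo⟩ := hjr
    rcases eq_or_ne j w with hjw0 | hjw
    · rw [hjw0, hcomp'_w, hcount_c1]
      have hs1 := hS w hw hrootw
      have hs2 := hS lo hlo hrootlo
      have hcw : 2 ^ ((pget rank w).toNat - 1) ≤ List.count c1 comp + List.count c2 comp := by
        rcases hcls with ⟨hw1, _⟩ | ⟨hw1, _⟩ <;> rw [hw1] at hs1 <;> omega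
      rw [hrank'_w]
      split_ifs with hcase
      · have hk1 := hrkb_w.1
        set k := (pget rank w).toNat with hk
        have : (pget rank w + 1).toNat = k + 1 := by omega
        rw [this]
        have h2k : 2 ^ ((k+1)-1) = 2 ^ (k-1) + 2 ^ (k-1) := by
          rw [Nat.add_sub_cancel]
          exact (two_pow_pred k (by omega)).symm
        rw [h2k]
        have hklo : (pget rank lo).toNat = k := by omega
        rw [hklo] at hs2
        rcases hcls with ⟨hw1, hlo1⟩ | ⟨hw1, hlo1⟩ <;>
          rw [hw1] at hs1 <;> rw [hlo1] at hs2 <;> omega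
      · exact hcw
    · have hjo := hother_class j hj hjr hjw hjlo
      rw [hcomp'_keep j hj hjo.2, hcount_other _ hjo.1 hjo.2, hrank'_other j hjw]
      exact hS j hj hjr

theorem ufComNum_spec (n' : Nat) (par rank num comp : List Int)
    (hInv : UFInv n' par rank num comp)
    (a b : Int) (halo : -(n':Int) ≤ a) (hahi : a < (n':Int))
    (hblo : -(n':Int) ≤ b) (hbhi : b < (n':Int)) :
    ∃ par' rank' num',
      ufComNum par rank num a b =
        ((if pget comp (normIdx n' a) = pget comp (normIdx n' b) then 0
          else (List.count (pget comp (normIdx n' a)) comp : Int) *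
               (List.count (pget comp (normIdx n' b)) comp : Int)), (par', rank', num')) ∧
      UFInv n' par' rank' num'
        (if pget comp (normIdx n' a) = pget comp (normIdx n' b) then comp
         else comp.map (fun c => if c = pget comp (normIdx n' b)
            then pget comp (normIdx n' a) else c)) := by
  set la := pget comp (normIdx n' a) with hla
  set lb := pget comp (normIdx n' b) with hlb
  have hlenpar : par.length = n' := hInv.1
  obtain ⟨ra, par1, heq1, hInv1, hlen1, hralt, hraroot, hracls, hriff1⟩ :=
    ufRoot_spec n' par rank num comp hInv a halo hahi par.length (by omega)
  obtain ⟨rbv, par2, heq2, hInv2, hlen2, hrblt, hrbroot, hrbcls, hriff2⟩ :=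
    ufRoot_spec n' par1 rank num comp hInv1 b hblo hbhi par1.length (by omega)
  have hraroot2 : (pget par2 ra).toNat = ra := (hriff2 ra hralt).2 hraroot
  rw [← hla] at hracls
  rw [← hlb] at hrbcls
  rw [show ufComNum par rank num a b =
      (let ra := ufRoot par.length par a
       let rb := ufRoot ra.2.length ra.2 b
       if ra.1 = rb.1 then (0, (rb.2, rank, num))
       else ufUnite rb.2 rank num a b) from rfl]
  simp only [heq1, heq2]
  by_cases hcls : la = lb
  · -- same component: the two roots coincide
    have hreq : ra = rbv := by
      apply hInv2.2.2.2.2.2.2.2.2.1 ra hralt rbv hrblt hraroot2 hrbroot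
      rw [hracls, hrbcls, hcls]
    rw [if_pos (show ((ra:Nat):Int) = ((rbv:Nat):Int) by exact_mod_cast hreq), if_pos hcls, if_pos hcls]
    exact ⟨par2, rank, num, rfl, hInv2⟩
  · -- different components: unite
    have hrne : ra ≠ rbv := by
      intro h
      exact hcls (by rw [← hracls, ← hrbcls, h])
    rw [if_neg (by exact_mod_cast fun h => hrne (by exact_mod_cast h)), if_neg hcls, if_neg hcls]
    -- unfold unite; roots are found again (compressed paths)
    rw [show ufUnite par2 rank num a b =
      (let ra := ufRoot par2.length par2 a
       let rb := ufRoot ra.2.length ra.2 b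
       let out := PySem.List.pyGetD num ra.1 0 * PySem.List.pyGetD num rb.1 0
       let rab := if PySem.List.pyGetD rank ra.1 0 < PySem.List.pyGetD rank rb.1 0 then (rb.1, ra.1) else (ra.1, rb.1)
       let par3 := PySem.List.pySetD rb.2 rab.2 rab.1
       let num2 := PySem.List.pySetD num rab.1 (PySem.List.pyGetD num rab.1 0 + PySem.List.pyGetD num rab.2 0)
       let rank2 := if PySem.List.pyGetD rank rab.1 0 = PySem.List.pyGetD rank rab.2 0 then PySem.List.pySetD rank rab.1 (PySem.List.pyGetD rank rab.1 0 + 1) else rank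
       (out, (par3, rank2, num2))) from rfl]
    have hlen2' : par2.length = n' := hlen2
    obtain ⟨ra2, par3, heq3, hInv3, hlen3, hra2lt, hra2root, hra2cls, hriff3⟩ :=
      ufRoot_spec n' par2 rank num comp hInv2 a halo hahi par2.length (by omega)
    obtain ⟨rb2, par4, heq4, hInv4, hlen4, hrb2lt, hrb2root, hrb2cls, hriff4⟩ :=
      ufRoot_spec n' par3 rank num comp hInv3 b hblo hbhi par3.length (by omega)
    rw [← hla] at hra2cls
    rw [← hlb] at hrb2cls
    have hra2root4 : (pget par4 ra2).toNat = ra2 := (hriff4 ra2 hra2lt).2 hra2root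
    have hra2ne : ra2 ≠ rb2 := by
      intro h; exact hcls (by rw [← hra2cls, ← hrb2cls, h])
    simp only [heq3, heq4]
    have hnumlen : num.length = n' := hInv4.2.2.1
    have hranklen : rank.length = n' := hInv4.2.1
    -- all the pyGetD/pySetD on nonnegative cast indices
    have hgnum : ∀ t : Nat, t < n' → PySem.List.pyGetD num ((t:Nat):Int) 0 = pget num t := by
      intro t ht
      rw [pyGetD_norm num n' hnumlen _ 0 (by omega) (by exact_mod_cast ht), normIdx_natCast]
    have hgrank : ∀ t : Nat, t < n' → PySem.List.pyGetD rank ((t:Nat):Int) 0 = pget rank t := by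
      intro t ht
      rw [pyGetD_norm rank n' hranklen _ 0 (by omega) (by exact_mod_cast ht), normIdx_natCast]
    have hN4 := hInv4.2.2.2.2.2.2.2.2.2.1
    have hnum_ra2 : pget num ra2 = ((List.count la comp : Nat) : Int) := by
      rw [← hra2cls]; exact hN4 ra2 hra2lt hra2root4
    have hnum_rb2 : pget num rb2 = ((List.count lb comp : Nat) : Int) := by
      rw [← hrb2cls]; exact hN4 rb2 hrb2lt hrb2root
    rw [hgnum ra2 hra2lt, hgnum rb2 hrb2lt, hgrank ra2 hra2lt, hgrank rb2 hrb2lt]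
    by_cases hrkc : pget rank ra2 < pget rank rb2
    · -- winner rb2, loser ra2
      rw [if_pos hrkc]
      simp only []
      rw [hgrank rb2 hrb2lt, hgrank ra2 hra2lt, hgnum rb2 hrb2lt, hgnum ra2 hra2lt]
      rw [pySetD_norm par4 n' hlen4 _ _ (by omega) (by exact_mod_cast hra2lt), normIdx_natCast]
      rw [pySetD_norm num n' hnumlen _ _ (by omega) (by exact_mod_cast hrb2lt), normIdx_natCast]
      have hinv' := unite_reestablish n' par4 rank num comp hInv4 la lb hcls
        rb2 ra2 hrb2lt hra2lt hrb2root hra2root4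
        (Or.inr ⟨hrb2cls, hra2cls⟩) (le_of_lt hrkc)
      by_cases hrkeq : pget rank rb2 = pget rank ra2
      · rw [if_pos hrkeq,
          pySetD_norm rank n' hranklen _ _ (by omega) (by exact_mod_cast hrb2lt), normIdx_natCast]
        rw [if_pos hrkeq] at hinv'
        refine ⟨_, _, _, ?_, hinv'⟩
        rw [hnum_ra2, hnum_rb2]
      · rw [if_neg hrkeq]
        rw [if_neg hrkeq] at hinv'
        refine ⟨_, _, _, ?_, hinv'⟩
        rw [hnum_ra2, hnum_rb2]
    · -- winner ra2, loser rb2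
      rw [if_neg hrkc]
      simp only []
      rw [hgrank ra2 hra2lt, hgrank rb2 hrb2lt, hgnum ra2 hra2lt, hgnum rb2 hrb2lt]
      rw [pySetD_norm par4 n' hlen4 _ _ (by omega) (by exact_mod_cast hrb2lt), normIdx_natCast]
      rw [pySetD_norm num n' hnumlen _ _ (by omega) (by exact_mod_cast hra2lt), normIdx_natCast]
      have hinv' := unite_reestablish n' par4 rank num comp hInv4 la lb hcls
        ra2 rb2 hra2lt hrb2lt hra2root4 hrb2root
        (Or.inl ⟨hra2cls, hrb2cls⟩) (by omega)
      by_cases hrkeq : pget rank ra2 = pget rank rb2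
      · rw [if_pos hrkeq,
          pySetD_norm rank n' hranklen _ _ (by omega) (by exact_mod_cast hra2lt), normIdx_natCast]
        rw [if_pos hrkeq] at hinv'
        refine ⟨_, _, _, ?_, hinv'⟩
        rw [hnum_ra2, hnum_rb2]
      · rw [if_neg hrkeq]
        rw [if_neg hrkeq] at hinv'
        refine ⟨_, _, _, ?_, hinv'⟩
        rw [hnum_ra2, hnum_rb2]

def idxs (s : Nat) : List Int := (List.range s).map (fun k : Nat => (s:Int) - 1 - (k:Int))

theorem idxs_succ (s : Nat) : idxs (s+1) = ((s:Nat):Int) :: idxs s := by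
  unfold idxs
  rw [List.range_succ_eq_map]
  simp only [List.map_cons, List.map_map]
  congr 1
  · push_cast; ring
  · apply List.map_congr_left
    intro k _
    simp only [Function.comp_apply]
    push_cast; ring

theorem pyRange_down (m : Int) (hm : 0 ≤ m) :
    PySem.List.pyRange (m-1) (-1) (-1) = idxs m.toNat := by
  unfold PySem.List.pyRange idxs
  rw [if_neg (by norm_num)]
  simp only [show ¬ ((0:Int) < -1) from by norm_num, if_false]
  rcases Nat.eq_zero_or_pos m.toNat with h0 | hpos
  · rw [if_neg (by omega), h0]
    rfl
  · rw [if_pos (by omega)]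
    have hcount : ((m - 1 - -1 + - -1 - 1) / -(-1 : Int)).toNat = m.toNat := by
      norm_num
    rw [hcount]
    apply List.map_congr_left
    intro k hk
    rw [List.mem_range] at hk
    have : ((m.toNat : Nat) : Int) = m := by omega
    rw [this]; ring

theorem replicate_set (s : Nat) (l : List Int) (v : Int) :
    (List.replicate (s+1) (0:Int) ++ l).set s v = List.replicate s 0 ++ v :: l := by
  induction s with
  | zero => simp
  | succ s ih =>
    rw [List.replicate_succ, List.cons_append, List.set_cons_succ, ih,
      List.replicate_succ, List.cons_append]

theorem get_mid (s : Nat) (x : Int) (r : List Int) :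
    PySem.List.pyGetD (List.replicate (s+1) (0:Int) ++ x :: r) ((s:Int)+1) 0 = x := by
  unfold PySem.List.pyGetD
  have hlen : (List.replicate (s+1) (0:Int)).length = s+1 := by simp
  have := PySem.List.pyGet?_append_length (List.replicate (s+1) (0:Int)) r x
  rw [hlen] at this
  have hcast : ((s:Int)+1) = (((s+1:Nat)):Int) := by push_cast; ring
  rw [hcast, this]
  rfl

theorem foldB_acc (l : List (Int × Int)) :
    ∀ (out comp : List Int) (cur : Int),
      (l.foldl calcStepB (out, comp, cur)).1 = out ++ (l.foldl calcStepB ([], comp, cur)).1 ∧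
      (l.foldl calcStepB (out, comp, cur)).2 = (l.foldl calcStepB ([], comp, cur)).2 := by
  induction l with
  | nil => intro out comp cur; simp
  | cons ab t ih =>
    intro out comp cur
    have hstep : ∀ o : List Int, calcStepB (o, comp, cur) ab =
        (o ++ [cur], (calcStepB ([], comp, cur) ab).2) := by
      intro o
      unfold calcStepB
      simp only []
      split_ifs <;> rfl
    rw [List.foldl_cons, List.foldl_cons, hstep out, hstep []]
    obtain ⟨h1, h2⟩ := ih (out ++ [cur]) (calcStepB ([], comp, cur) ab).2.1
      (calcStepB ([], comp, cur) ab).2.2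
    obtain ⟨h3, h4⟩ := ih ([] ++ [cur]) (calcStepB ([], comp, cur) ab).2.1
      (calcStepB ([], comp, cur) ab).2.2
    constructor
    · rw [h1, h3]
      simp
    · rw [h2, h4]

theorem lockstep (bridges : List (Int × Int)) (n' : Nat) :
    ∀ (s : Nat), s ≤ bridges.length →
    (∀ p ∈ bridges.take s, -(n':Int) ≤ p.1 - 1 ∧ p.1 - 1 < (n':Int) ∧
      -(n':Int) ≤ p.2 - 1 ∧ p.2 - 1 < (n':Int)) →
    ∀ (par rank num comp : List Int) (cur : Int) (rest : List Int),
    UFInv n' par rank num comp →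
    ((idxs s).foldl (calcStepA bridges) (List.replicate s (0:Int) ++ cur :: rest, (par, rank, num))).1
     = ((bridges.take s).reverse.foldl calcStepB ([], comp, cur)).2.2
       :: ((bridges.take s).reverse.foldl calcStepB ([], comp, cur)).1.reverse ++ rest := by
  intro s
  induction s with
  | zero =>
    intro _ _ par rank num comp cur rest _
    simp [idxs]
  | succ s ih =>
    intro hs hval par rank num comp cur rest hInv
    have hslt : s < bridges.length := by omega
    have hcomplen : comp.length = n' := hInv.2.2.2.1
    set ab := bridges[s] with hab
    have habmem : ab ∈ bridges.take (s+1) := by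
      have h1 : s < (bridges.take (s+1)).length := by
        rw [List.length_take]; omega
      have h2 : (bridges.take (s+1))[s] = bridges[s] := List.getElem_take
      rw [hab, ← h2]
      exact List.getElem_mem h1
    obtain ⟨hv1, hv2, hv3, hv4⟩ := hval ab habmem
    -- A's first step
    obtain ⟨par', rank', num', heqg, hInv'⟩ :=
      ufComNum_spec n' par rank num comp hInv (ab.1 - 1) (ab.2 - 1) hv1 hv2 hv3 hv4
    set la := pget comp (normIdx n' (ab.1 - 1)) with hla
    set lb := pget comp (normIdx n' (ab.2 - 1)) with hlb
    set gval : Int := (if la = lb then 0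
      else (List.count la comp : Int) * (List.count lb comp : Int)) with hgval
    set comp' := (if la = lb then comp
      else comp.map (fun c => if c = lb then la else c)) with hcomp'
    have hstepA : calcStepA bridges
        (List.replicate (s+1) (0:Int) ++ cur :: rest, (par, rank, num)) ((s:Nat):Int) =
        (List.replicate s (0:Int) ++ (cur - gval) :: cur :: rest, (par', rank', num')) := by
      unfold calcStepA
      simp only []
      rw [PySem.List.pyGetD_natCast, List.getD_eq_getElem _ _ hslt, ← hab, heqg]
      simp only []
      rw [get_mid s cur rest,
        PySem.List.pySetD_of_nonneg _ _ (by omega), Int.toNat_natCast, replicate_set]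
    -- B's first step
    have hstepB : calcStepB ([], comp, cur) ab = ([cur], comp', cur - gval) := by
      unfold calcStepB
      simp only [List.nil_append]
      rw [pyGetD_norm comp n' hcomplen _ 0 hv1 hv2,
        pyGetD_norm comp n' hcomplen _ 0 hv3 hv4, ← hla, ← hlb]
      by_cases hc : la = lb
      · rw [if_neg (by simpa using hc), hgval, if_pos hc, hcomp', if_pos hc]
        simp
      · rw [if_pos (by simpa using hc), hgval, if_neg hc, hcomp', if_neg hc]
        simp [PySem.List.count_eq]
    -- assemble
    rw [idxs_succ, List.foldl_cons, hstepA]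
    have hval' : ∀ p ∈ bridges.take s, -(n':Int) ≤ p.1 - 1 ∧ p.1 - 1 < (n':Int) ∧
        -(n':Int) ≤ p.2 - 1 ∧ p.2 - 1 < (n':Int) := by
      intro p hp
      have hmin : min s (s+1) = s := by omega
      have hp2 : p ∈ List.take s (List.take (s+1) bridges) := by
        rw [List.take_take, hmin]; exact hp
      exact hval p (List.mem_of_mem_take hp2)
    have hIH := ih (by omega) hval' par' rank' num' comp' (cur - gval) (cur :: rest) hInv'
    rw [hIH]
    rw [List.take_add_one, List.getElem?_eq_getElem hslt]
    simp only [Option.toList_some, List.reverse_append, List.reverse_cons, List.reverse_nil,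
      List.nil_append, List.cons_append, List.foldl_cons, ← hab]
    rw [hstepB]
    obtain ⟨hacc1, hacc2⟩ := foldB_acc ((bridges.take s).reverse) [cur] comp' (cur - gval)
    rw [hacc1, hacc2]
    simp

theorem pget_range_map (n' : Nat) (j : Nat) (hj : j < n') :
    pget ((List.range n').map (fun x : Nat => (x:Int))) j = (j:Int) := by
  unfold pget
  rw [List.getD_eq_getElem _ _ (by simpa using hj)]
  simp

theorem pget_replicate (n' : Nat) (v : Int) (j : Nat) (hj : j < n') :
    pget (List.replicate n' v) j = v := by
  unfold pget
  rw [List.getD_eq_getElem _ _ (by simpa using hj)]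
  simp

theorem UFInv_init (n' : Nat) :
    UFInv n' ((List.range n').map (fun x : Nat => (x:Int))) (List.replicate n' 1)
      (List.replicate n' 1) ((List.range n').map (fun x : Nat => (x:Int))) := by
  have hcnt : ∀ j, j < n' →
      List.count ((j:Int)) ((List.range n').map (fun x : Nat => (x:Int))) = 1 := by
    intro j hj
    apply List.count_eq_one_of_mem
    · exact List.Nodup.map (fun a b h => by exact_mod_cast h) List.nodup_range
    · simp only [List.mem_map, List.mem_range]
      exact ⟨j, hj, rfl⟩
  refine ⟨by simp, by simp, by simp, by simp, ?_, ?_, ?_, ?_, ?_, ?_, ?_⟩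
  · intro j hj
    rw [pget_range_map n' j hj]; constructor <;> omega
  · intro j hj hne
    exfalso; apply hne; rw [pget_range_map n' j hj]; omega
  · intro j hj
    rw [pget_replicate n' 1 j hj]; constructor <;> omega
  · intro j hj
    rw [pget_range_map n' j hj]
    have ht : ((j:Int)).toNat = j := by omega
    rw [ht]
    exact pget_range_map n' j hj
  · intro j hj k hk _ _ hcomp
    rw [pget_range_map n' j hj, pget_range_map n' k hk] at hcomp
    exact_mod_cast hcomp
  · intro j hj _
    rw [pget_replicate n' 1 j hj, pget_range_map n' j hj, hcnt j hj]
    simp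
  · intro j hj _
    rw [pget_replicate n' 1 j hj, pget_range_map n' j hj, hcnt j hj]
    simp

theorem ports_agree (n : Int) (m : Int) (bridges : List (Int × Int))
    (hm0 : 0 ≤ m) (hmlen : m ≤ (bridges.length : Int))
    (hval : ∀ p ∈ bridges.take m.toNat,
      (1 - n ≤ p.1 ∧ p.1 ≤ n ∧ 1 - n ≤ p.2 ∧ p.2 ≤ n)) :
    calculate_inconvenience n m bridges = calculate_inconvenience_alt n m bridges := by
  unfold calculate_inconvenience calculate_inconvenience_alt
  simp only []
  set n' := n.toNat with hn'
  set mN := m.toNat with hmN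
  have hval' : ∀ p ∈ bridges.take mN, -(n':Int) ≤ p.1 - 1 ∧ p.1 - 1 < (n':Int) ∧
      -(n':Int) ≤ p.2 - 1 ∧ p.2 - 1 < (n':Int) := by
    intro p hp
    obtain ⟨h1, h2, h3, h4⟩ := hval p hp
    have hn1 : 1 ≤ n := by omega
    have : (n':Int) = n := by omega
    omega
  have hm1 : (m+1).toNat = mN + 1 := by omega
  rw [hm1]
  rw [PySem.List.pySetD_of_nonneg _ _ hm0, ← hmN]
  have hrepl : (List.replicate (mN+1) (0:Int)).set mN (PySem.Int.floordiv (n*(n-1)) 2) =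
      List.replicate mN 0 ++ (PySem.Int.floordiv (n*(n-1)) 2) :: [] := by
    have := replicate_set mN ([] : List Int) (PySem.Int.floordiv (n*(n-1)) 2)
    rw [List.append_nil] at this
    exact this
  rw [hrepl, pyRange_down m hm0, ← hmN]
  rw [PySem.List.slice_to _ hm0, ← hmN]
  rw [lockstep bridges n' mN (by omega) hval'
    ((List.range n').map (fun x : Nat => (x:Int))) (List.replicate n' 1) (List.replicate n' 1)
    ((List.range n').map (fun x : Nat => (x:Int)))
    (PySem.Int.floordiv (n*(n-1)) 2) [] (UFInv_init n')]
  rw [PySem.List.slice_from_one]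
  simp

-- ===== VERDICT (by name: the statement is the Claim_ definition above) =====
theorem calculate_inconvenience_spec : Claim_equal_calculate_inconvenience := by
  intro n m bridges _ hPre
  obtain ⟨hm0, hmlen, hval⟩ := hPre
  unfold Spec_calculate_inconvenience
  exact ports_agree n m bridges hm0 (by exact_mod_cast hmlen) hval
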